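-- pv_equiv track=rewrite | github.com/YEONGORI/Algorithm | Programmers/CUMMULATIVE_SUM/파괴되지않은건물.py | solution
-- ===== SOURCE A (Python) =====
-- def solution(board, skill):
--     answer = 0
--
--     n, m = len(board), len(board[0])
--     cum = [[0] * (m+1) for _ in range(n+1)]
--
--     for tp, r1, c1, r2, c2, degree in skill: # 변화량 배열 만들고
--         if tp == 1:
--             cum[r1][c1] += -degree
--             cum[r2+1][c2+1] += -degree
--             cum[r1][c2+1] += degree
--             cum[r2+1][c1] += degree
--         else:
--             cum[r1][c1] += degree
--             cum[r2+1][c2+1] += degree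
--             cum[r1][c2+1] += -degree
--             cum[r2+1][c1] += -degree
--
--     for i in range(1, n+1): # 누적합 배열 만들고
--         for j in range(m+1):
--             cum[i][j] += cum[i-1][j]
--     for j in range(1, m+1):
--         for i in range(n+1):
--             cum[i][j] += cum[i][j-1]
--
--     for i in range(n): # 기존 배열에 합치기
--         for j in range(m):
--             board[i][j] += cum[i][j]
--             if board[i][j] > 0: answer += 1
--
--
--     return answer
-- ===== SOURCE B (Python) =====
-- def solution(board, skill):
--     for tp, r1, c1, r2, c2, degree in skill:
--         d = -degree if tp == 1 else degree
--         for i in range(r1, r2 + 1):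
--             row = board[i]
--             for j in range(c1, c2 + 1):
--                 row[j] += d
--     n, m = len(board), len(board[0])
--     return sum(1 for i in range(n) for j in range(m) if board[i][j] > 0)
-- ===== Notes on version B (the rewrite author's own statement) =====
-- stated objective: simpler
-- what changed: Replaced the 2D difference-array plus double prefix-sum machinery by direct per-skill rectangle updates on the board followed by a single positive-cell count.
-- outside the precondition, e.g. on solution([[1, 1], [1, 1]], [[2, -1, 0, 0, 0, 5]]): A returns 3, B returns 4; on solution([[1], [1], [1]], [[2, 2, 0, 0, 0, 5]]): A returns 2, B returns 3
import Mathlib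
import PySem

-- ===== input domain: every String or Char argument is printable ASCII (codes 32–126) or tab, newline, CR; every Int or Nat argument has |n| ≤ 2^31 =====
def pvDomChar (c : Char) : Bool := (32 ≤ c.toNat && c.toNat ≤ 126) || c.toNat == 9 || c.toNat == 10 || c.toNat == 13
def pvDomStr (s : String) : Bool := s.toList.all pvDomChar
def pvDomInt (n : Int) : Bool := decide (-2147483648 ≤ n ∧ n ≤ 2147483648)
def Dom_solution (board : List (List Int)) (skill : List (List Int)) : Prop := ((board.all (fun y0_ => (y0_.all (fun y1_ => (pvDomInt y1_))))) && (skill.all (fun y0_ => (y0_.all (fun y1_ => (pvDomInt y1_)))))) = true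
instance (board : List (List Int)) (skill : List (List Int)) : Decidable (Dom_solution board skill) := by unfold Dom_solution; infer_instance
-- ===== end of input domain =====

-- B replaces A's 2D difference-array + double prefix-sum machinery by direct per-skill rectangle
-- updates followed by a positive-cell count (objective: simpler). Both Pythons mutate `board` in
-- place (A adds the prefix array to every cell, B only touches cells inside the skill rectangles);
-- the equivalence proved here is about the RETURN value only.

-- ===== PORT A =====
-- board[i][j] read (Python-exact for in-range/negative indices via pyGetD)
def pvGet2 (board : List (List Int)) (i j : Int) : Int :=
  PySem.List.pyGetD (PySem.List.pyGetD board i []) j 0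

-- cum[i][j] += d on the (n+1)×(m+1) array, modelled as a function on coordinates
-- (exact under Pre_solution, where every index written is in range and nonnegative)
def pvBump (f : Int → Int → Int) (i j d : Int) : Int → Int → Int :=
  fun a b => if a = i ∧ b = j then f a b + d else f a b

-- one iteration of A's first loop ('for tp, r1, c1, r2, c2, degree in skill'); a row of a
-- shape Python's unpacking would raise on (excluded by Pre_solution) leaves cum unchanged
def pvStepSkill (c : Int → Int → Int) (s : List Int) : Int → Int → Int :=
  match s with
  | [tp, r1, c1, r2, c2, degree] =>
    if tp = 1 then
      pvBump (pvBump (pvBump (pvBump c r1 c1 (-degree)) (r2+1) (c2+1) (-degree)) r1 (c2+1) degree) (r2+1) c1 degree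
    else
      pvBump (pvBump (pvBump (pvBump c r1 c1 degree) (r2+1) (c2+1) degree) r1 (c2+1) (-degree)) (r2+1) c1 (-degree)
  | _ => c

def pvCum1 (skill : List (List Int)) : Int → Int → Int :=
  skill.foldl pvStepSkill (fun _ _ => 0)

-- 'for i in range(1, n+1): for j in range(m+1): cum[i][j] += cum[i-1][j]'
def pvCum2 (skill : List (List Int)) (n m : Int) : Int → Int → Int :=
  (PySem.List.pyRange 1 (n+1)).foldl (fun c i =>
    (PySem.List.pyRange 0 (m+1)).foldl (fun c' j => pvBump c' i j (c' (i-1) j)) c) (pvCum1 skill)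

-- 'for j in range(1, m+1): for i in range(n+1): cum[i][j] += cum[i][j-1]'
def pvCum3 (skill : List (List Int)) (n m : Int) : Int → Int → Int :=
  (PySem.List.pyRange 1 (m+1)).foldl (fun c j =>
    (PySem.List.pyRange 0 (n+1)).foldl (fun c' i => pvBump c' i j (c' i (j-1))) c) (pvCum2 skill n m)

def solution (board : List (List Int)) (skill : List (List Int)) : Int :=
  let n : Int := board.length
  let m : Int := (board.getD 0 []).length   -- board[0]; Pre_solution excludes the empty board
  (PySem.List.pyRange 0 n).foldl (fun a i =>
    (PySem.List.pyRange 0 m).foldl (fun a' j =>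
      if pvGet2 board i j + pvCum3 skill n m i j > 0 then a' + 1 else a') a) 0

-- ===== PORT B =====
-- one skill: 'd = -degree if tp == 1 else degree; add d to board[r1..r2][c1..c2]'
-- (indices are nonnegative under Pre_solution, so .toNat is exact)
def pvApplySkill (bd : List (List Int)) (s : List Int) : List (List Int) :=
  match s with
  | [tp, r1, c1, r2, c2, degree] =>
    let d := if tp = 1 then -degree else degree
    (PySem.List.pyRange r1 (r2+1)).foldl (fun bd2 i =>
      bd2.modify i.toNat (fun row =>
        (PySem.List.pyRange c1 (c2+1)).foldl (fun r j => r.modify j.toNat (fun v => v + d)) row)) bd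
  | _ => bd

def solution_alt (board : List (List Int)) (skill : List (List Int)) : Int :=
  let bd := skill.foldl pvApplySkill board
  let n : Int := bd.length
  let m : Int := (bd.getD 0 []).length
  (PySem.List.pyRange 0 n).foldl (fun a i =>
    (PySem.List.pyRange 0 m).foldl (fun a' j =>
      if pvGet2 bd i j > 0 then a' + 1 else a') a) 0

-- ===== PRECONDITION & SPEC =====
-- Pre_ restricts to the problem's natural domain: a non-empty board whose rows are at least as
-- long as row 0, and skills [tp,r1,c1,r2,c2,deg] naming a real rectangle 0 ≤ r1 ≤ r2 < n,
-- 0 ≤ c1 ≤ c2 < m.  Outside it A raises (empty board, short rows, rows of ≠ 6 entries, edges past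
-- the bottom/right), except for negative or inverted (r1 > r2 / c1 > c2) rectangle coordinates,
-- malformed inputs on which both programs' values are accidents of index wraparound /
-- difference-array algebra and neither is the specified one.
def Pre_solution (board : List (List Int)) (skill : List (List Int)) : Prop :=
  board ≠ [] ∧
  (∀ row ∈ board, (board.getD 0 []).length ≤ row.length) ∧
  (∀ s ∈ skill, s.length = 6 ∧
    0 ≤ s.getD 1 0 ∧ s.getD 1 0 ≤ s.getD 3 0 ∧ s.getD 3 0 < (board.length : Int) ∧
    0 ≤ s.getD 2 0 ∧ s.getD 2 0 ≤ s.getD 4 0 ∧ s.getD 4 0 < ((board.getD 0 []).length : Int))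
instance (board : List (List Int)) (skill : List (List Int)) : Decidable (Pre_solution board skill) := by
  unfold Pre_solution; infer_instance

def pvWitness_solution : List (List Int) × List (List Int) := ([[1, -1], [0, 2]], [[2, 0, 0, 1, 1, 1], [1, 0, 1, 0, 1, 3]])

def Spec_solution (board : List (List Int)) (skill : List (List Int)) (out : Int) : Prop := out = solution_alt board skill
instance (board : List (List Int)) (skill : List (List Int)) (out : Int) : Decidable (Spec_solution board skill out) := by unfold Spec_solution; infer_instance

-- ===== CLAIM (what is proved, stated in full; the proofs are below) =====
def Claim_equal_solution : Prop := ∀ (board : List (List Int)) (skill : List (List Int)), Dom_solution board skill → Pre_solution board skill → Spec_solution board skill (solution board skill)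

-- ===== LEMMAS AND PROOFS =====

-- the effect of one skill row on one board cell: d inside the rectangle, 0 outside
def pvContrib (s : List Int) (i j : Int) : Int :=
  match s with
  | [tp, r1, c1, r2, c2, degree] =>
    let d := if tp = 1 then -degree else degree
    if r1 ≤ i ∧ i ≤ r2 ∧ c1 ≤ j ∧ j ≤ c2 then d else 0
  | _ => 0

-- the four difference-array deltas of one skill row, as a function of the cell
def pvFour (s : List Int) (a b : Int) : Int :=
  match s with
  | [tp, r1, c1, r2, c2, degree] =>
    let d := if tp = 1 then -degree else degree
    (if a = r1 ∧ b = c1 then d else 0) + (if a = r2+1 ∧ b = c2+1 then d else 0)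
      + (if a = r1 ∧ b = c2+1 then -d else 0) + (if a = r2+1 ∧ b = c1 then -d else 0)
  | _ => 0

-- 2D prefix sum of a coordinate function over [0,i] × [0,j]
def pvS2 (f : Int → Int → Int) (i j : Int) : Int :=
  ((PySem.List.pyRange 0 (j+1)).map (fun y =>
    ((PySem.List.pyRange 0 (i+1)).map (fun x => f x y)).sum)).sum

theorem pvStepSkill_apply (c : Int → Int → Int) (s : List Int) (a b : Int) :
    pvStepSkill c s a b = c a b + pvFour s a b := by
  rcases s with _ | ⟨tp, _ | ⟨r1, _ | ⟨c1, _ | ⟨r2, _ | ⟨c2, _ | ⟨degree, _ | ⟨x, rest⟩⟩⟩⟩⟩⟩⟩ <;>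
    first
    | (simp [pvStepSkill, pvFour]; done)
    | (by_cases htp : tp = 1 <;>
        simp only [pvStepSkill, pvFour, pvBump, htp, if_true, if_false] <;>
        split_ifs <;> omega)

theorem pvFoldStep (skill : List (List Int)) : ∀ (f : Int → Int → Int) (a b : Int),
    (skill.foldl pvStepSkill f) a b = f a b + (skill.map (fun s => pvFour s a b)).sum := by
  induction skill with
  | nil => intro f a b; simp
  | cons s rest ih =>
    intro f a b
    simp only [List.foldl_cons, List.map_cons, List.sum_cons, ih, pvStepSkill_apply]
    ring

theorem pvCum1_apply (skill : List (List Int)) (a b : Int) :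
    pvCum1 skill a b = (skill.map (fun s => pvFour s a b)).sum := by
  simp [pvCum1, pvFoldStep]

theorem pvRowFold (i M : Int) : ∀ (k : Nat) (t : Int) (c : Int → Int → Int) (a b : Int), (M - t).toNat = k →
    ((PySem.List.pyRange t M).foldl (fun c' j => pvBump c' i j (c' (i-1) j)) c) a b
      = if a = i ∧ t ≤ b ∧ b < M then c a b + c (i-1) b else c a b := by
  intro k
  induction k with
  | zero =>
    intro t c a b h
    rw [PySem.List.pyRange_one_eq_nil (by omega)]
    simp only [List.foldl_nil]
    rw [if_neg (by omega)]
  | succ k ih =>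
    intro t c a b h
    rw [PySem.List.pyRange_one_cons (by omega), List.foldl_cons]
    rw [ih (t+1) _ a b (by omega)]
    simp only [pvBump]
    by_cases hb : b = t
    · subst hb; split_ifs <;> omega
    · split_ifs <;> omega

theorem pvColFold (j M : Int) : ∀ (k : Nat) (t : Int) (c : Int → Int → Int) (a b : Int), (M - t).toNat = k →
    ((PySem.List.pyRange t M).foldl (fun c' i => pvBump c' i j (c' i (j-1))) c) a b
      = if b = j ∧ t ≤ a ∧ a < M then c a b + c a (j-1) else c a b := by
  intro k
  induction k with
  | zero =>
    intro t c a b h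
    rw [PySem.List.pyRange_one_eq_nil (by omega)]
    simp only [List.foldl_nil]
    rw [if_neg (by omega)]
  | succ k ih =>
    intro t c a b h
    rw [PySem.List.pyRange_one_cons (by omega), List.foldl_cons]
    rw [ih (t+1) _ a b (by omega)]
    simp only [pvBump]
    by_cases ha : a = t
    · subst ha; split_ifs <;> omega
    · split_ifs <;> omega

theorem pvCum2_apply (skill : List (List Int)) (m : Int) : ∀ (k : Nat) (a b : Int),
    ((PySem.List.pyRange 1 ((k:Int)+1)).foldl (fun c i =>
      (PySem.List.pyRange 0 (m+1)).foldl (fun c' j => pvBump c' i j (c' (i-1) j)) c) (pvCum1 skill)) a b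
    = if 0 ≤ a ∧ a ≤ (k:Int) ∧ 0 ≤ b ∧ b < m+1 then
        ((PySem.List.pyRange 0 (a+1)).map (fun x => pvCum1 skill x b)).sum
      else pvCum1 skill a b := by
  intro k
  induction k with
  | zero =>
    intro a b
    rw [show (((0:Nat):Int)+1) = 1 by norm_num, PySem.List.pyRange_one_eq_nil (le_refl 1)]
    simp only [List.foldl_nil]
    by_cases hc : 0 ≤ a ∧ a ≤ ((0:Nat):Int) ∧ 0 ≤ b ∧ b < m+1
    · rw [if_pos hc]
      have ha : a = 0 := by omega
      subst ha
      rw [PySem.List.pyRange_one_singleton]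
      simp
    · rw [if_neg hc]
  | succ k ih =>
    intro a b
    rw [show (((k+1:Nat):Int)+1) = (((k:Nat):Int)+1)+1 by push_cast; ring,
      PySem.List.pyRange_one_succ_right (by omega : (1:Int) ≤ ((k:Nat):Int)+1),
      List.foldl_append, List.foldl_cons, List.foldl_nil,
      pvRowFold ((k:Int)+1) (m+1) (m+1).toNat 0 _ a b (by omega),
      ih a b, show ((k:Int)+1-1) = ((k:Nat):Int) by ring, ih ((k:Nat):Int) b]
    by_cases hcnd : a = (k:Int)+1 ∧ 0 ≤ b ∧ b < m+1
    · obtain ⟨ha, hb1, hb2⟩ := hcnd; subst ha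
      rw [if_pos ⟨rfl, hb1, hb2⟩, if_neg (by omega), if_pos (by omega), if_pos (by omega),
        PySem.List.pyRange_one_succ_right (by omega : (0:Int) ≤ (k:Int)+1),
        List.map_append, List.sum_append]
      simp [add_comm]
    · rw [if_neg hcnd]
      by_cases hc2 : 0 ≤ a ∧ a ≤ ((k:Nat):Int) ∧ 0 ≤ b ∧ b < m+1
      · rw [if_pos hc2, if_pos (by omega)]
      · rw [if_neg hc2, if_neg (by omega)]

theorem pvColsFold (n : Int) (c0 : Int → Int → Int) : ∀ (k : Nat) (a b : Int),
    ((PySem.List.pyRange 1 ((k:Int)+1)).foldl (fun c j =>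
      (PySem.List.pyRange 0 (n+1)).foldl (fun c' i => pvBump c' i j (c' i (j-1))) c) c0) a b
    = if 0 ≤ a ∧ a < n+1 ∧ 0 ≤ b ∧ b ≤ (k:Int) then
        ((PySem.List.pyRange 0 (b+1)).map (fun y => c0 a y)).sum
      else c0 a b := by
  intro k
  induction k with
  | zero =>
    intro a b
    rw [show (((0:Nat):Int)+1) = 1 by norm_num, PySem.List.pyRange_one_eq_nil (le_refl 1)]
    simp only [List.foldl_nil]
    by_cases hc : 0 ≤ a ∧ a < n+1 ∧ 0 ≤ b ∧ b ≤ ((0:Nat):Int)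
    · rw [if_pos hc]
      have hb : b = 0 := by omega
      subst hb
      rw [PySem.List.pyRange_one_singleton]
      simp
    · rw [if_neg hc]
  | succ k ih =>
    intro a b
    rw [show (((k+1:Nat):Int)+1) = (((k:Nat):Int)+1)+1 by push_cast; ring,
      PySem.List.pyRange_one_succ_right (by omega : (1:Int) ≤ ((k:Nat):Int)+1),
      List.foldl_append, List.foldl_cons, List.foldl_nil,
      pvColFold ((k:Int)+1) (n+1) (n+1).toNat 0 _ a b (by omega),
      ih a b, show ((k:Int)+1-1) = ((k:Nat):Int) by ring, ih a ((k:Nat):Int)]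
    by_cases hcnd : b = (k:Int)+1 ∧ 0 ≤ a ∧ a < n+1
    · obtain ⟨hb, ha1, ha2⟩ := hcnd; subst hb
      rw [if_pos ⟨rfl, ha1, ha2⟩, if_neg (by omega), if_pos (by omega), if_pos (by omega),
        PySem.List.pyRange_one_succ_right (by omega : (0:Int) ≤ (k:Int)+1),
        List.map_append, List.sum_append]
      simp [add_comm]
    · rw [if_neg (by intro hx; exact hcnd ⟨hx.1, hx.2.1, hx.2.2⟩)]
      by_cases hc2 : 0 ≤ a ∧ a < n+1 ∧ 0 ≤ b ∧ b ≤ ((k:Nat):Int)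
      · rw [if_pos hc2, if_pos (by omega)]
      · rw [if_neg hc2, if_neg (by omega)]

theorem pvCum2_eval (skill : List (List Int)) (n m : Int) (hn : 0 ≤ n) (a b : Int) :
    pvCum2 skill n m a b
      = if 0 ≤ a ∧ a ≤ n ∧ 0 ≤ b ∧ b < m+1 then
          ((PySem.List.pyRange 0 (a+1)).map (fun x => pvCum1 skill x b)).sum
        else pvCum1 skill a b := by
  obtain ⟨k, rfl⟩ : ∃ k : Nat, n = (k:Int) := ⟨n.toNat, (Int.toNat_of_nonneg hn).symm⟩
  exact pvCum2_apply skill m k a b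

theorem pvCum3_eval (skill : List (List Int)) (n m : Int) (hn : 0 ≤ n) (hm : 0 ≤ m)
    (a b : Int) (ha : 0 ≤ a ∧ a ≤ n) (hb : 0 ≤ b ∧ b ≤ m) :
    pvCum3 skill n m a b = pvS2 (pvCum1 skill) a b := by
  obtain ⟨km, rfl⟩ : ∃ k : Nat, m = (k:Int) := ⟨m.toNat, (Int.toNat_of_nonneg hm).symm⟩
  unfold pvCum3
  rw [pvColsFold n _ km a b, if_pos (by omega)]
  unfold pvS2
  refine congrArg List.sum (List.map_congr_left ?_)
  intro y hy
  rw [PySem.List.mem_pyRange_one] at hy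
  rw [pvCum2_eval skill _ _ hn, if_pos (by omega)]

theorem pvS2_add (f g : Int → Int → Int) (a b : Int) :
    pvS2 (fun x y => f x y + g x y) a b = pvS2 f a b + pvS2 g a b := by
  unfold pvS2
  rw [← PySem.List.sum_map_add_int]
  refine congrArg List.sum (List.map_congr_left ?_)
  intro y _
  rw [← PySem.List.sum_map_add_int]

theorem pvS2_linear (skill : List (List Int)) (a b : Int) :
    pvS2 (fun x y => (skill.map (fun s => pvFour s x y)).sum) a b
      = (skill.map (fun s => pvS2 (pvFour s) a b)).sum := by
  induction skill with
  | nil => simp [pvS2]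
  | cons s rest ih =>
    simp only [List.map_cons, List.sum_cons, ← ih]
    unfold pvS2
    rw [← PySem.List.sum_map_add_int]
    refine congrArg List.sum (List.map_congr_left ?_)
    intro y _
    rw [← PySem.List.sum_map_add_int]

theorem sum_map_ite_eq (l : List Int) (hl : l.Nodup) (t v : Int) :
    (l.map (fun x => if x = t then v else 0)).sum = if t ∈ l then v else 0 := by
  induction l with
  | nil => simp
  | cons x xs ih =>
    simp only [List.map_cons, List.sum_cons, List.mem_cons, List.nodup_cons] at *
    by_cases hx : x = t
    · subst hx
      rw [if_pos rfl, ih hl.2, if_neg hl.1, if_pos (Or.inl rfl)]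
      ring
    · rw [if_neg hx, ih hl.2]
      by_cases hm : t ∈ xs
      · rw [if_pos hm, if_pos (Or.inr hm)]; ring
      · rw [if_neg hm, if_neg (by rintro (h | h); exact hx h.symm; exact hm h)]; ring

theorem pvS2_point (p q v : Int) (hp : 0 ≤ p) (hq : 0 ≤ q) (a b : Int) :
    pvS2 (fun x y => if x = p ∧ y = q then v else 0) a b = if p ≤ a ∧ q ≤ b then v else 0 := by
  unfold pvS2
  have hinner : ∀ y : Int,
      ((PySem.List.pyRange 0 (a+1)).map (fun x => if x = p ∧ y = q then v else 0)).sum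
        = if y = q then (if p ≤ a then v else 0) else 0 := by
    intro y
    by_cases hy : y = q
    · rw [if_pos hy,
        show (fun x => if x = p ∧ y = q then v else 0) = (fun x => if x = p then v else 0) by
          funext x; by_cases hx : x = p <;> simp [hx, hy],
        sum_map_ite_eq _ (PySem.List.nodup_pyRange_one 0 (a+1)) p v]
      simp only [PySem.List.mem_pyRange_one]
      by_cases hpa : p ≤ a
      · rw [if_pos ⟨hp, by omega⟩, if_pos hpa]
      · rw [if_neg (by omega), if_neg hpa]
    · rw [if_neg hy, show (fun x => if x = p ∧ y = q then v else 0) = (fun _ : Int => (0:Int)) by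
        funext x; rw [if_neg (fun hx => hy hx.2)]]
      simp
  rw [show ((PySem.List.pyRange 0 (b+1)).map (fun y => ((PySem.List.pyRange 0 (a+1)).map (fun x => if x = p ∧ y = q then v else 0)).sum)) = ((PySem.List.pyRange 0 (b+1)).map (fun y => if y = q then (if p ≤ a then v else 0) else 0)) from List.map_congr_left (fun y _ => hinner y),
    sum_map_ite_eq (PySem.List.pyRange 0 (b+1)) (PySem.List.nodup_pyRange_one 0 (b+1)) q _]
  simp only [PySem.List.mem_pyRange_one]
  split_ifs <;> omega

theorem pvS2_four (tp r1 c1 r2 c2 degree : Int) (h1 : 0 ≤ r1) (h2 : r1 ≤ r2) (h3 : 0 ≤ c1) (h4 : c1 ≤ c2)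
    (a b : Int) :
    pvS2 (pvFour [tp, r1, c1, r2, c2, degree]) a b = pvContrib [tp, r1, c1, r2, c2, degree] a b := by
  set d := (if tp = 1 then -degree else degree) with hd
  have hfn : pvFour [tp, r1, c1, r2, c2, degree] = (fun x y =>
      ((if x = r1 ∧ y = c1 then d else 0) + (if x = r2+1 ∧ y = c2+1 then d else 0)
        + (if x = r1 ∧ y = c2+1 then -d else 0)) + (if x = r2+1 ∧ y = c1 then -d else 0)) := rfl
  have hc : pvContrib [tp, r1, c1, r2, c2, degree] a b
      = (if r1 ≤ a ∧ a ≤ r2 ∧ c1 ≤ b ∧ b ≤ c2 then d else 0) := rfl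
  rw [hfn, hc, pvS2_add, pvS2_add, pvS2_add,
    pvS2_point r1 c1 d (by omega) (by omega) a b,
    pvS2_point (r2+1) (c2+1) d (by omega) (by omega) a b,
    pvS2_point r1 (c2+1) (-d) (by omega) (by omega) a b,
    pvS2_point (r2+1) c1 (-d) (by omega) (by omega) a b]
  split_ifs <;> omega

-- ===== B-side lemmas =====

theorem getD_modify_if {α : Type} (l : List α) (n : Nat) (f : α → α) (m : Nat) (dflt : α) :
    (l.modify n f).getD m dflt = if m = n ∧ n < l.length then f (l.getD m dflt) else l.getD m dflt := by
  simp only [List.getD_eq_getElem?_getD, List.getElem?_modify]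
  cases h : l[m]? with
  | none =>
    have hlen : l.length ≤ m := List.getElem?_eq_none_iff.mp h
    show (Option.map (fun a => if n = m then f a else a) none).getD dflt = _
    simp only [Option.map_none, Option.getD_none]
    rw [if_neg (by omega)]
  | some a =>
    have hlen : m < l.length := by
      by_contra hc
      rw [List.getElem?_eq_none_iff.mpr (by omega)] at h
      simp at h
    show (Option.map (fun a => if n = m then f a else a) (some a)).getD dflt = _
    simp only [Option.map_some, Option.getD_some]
    by_cases hnm : n = m
    · rw [if_pos hnm, if_pos ⟨hnm.symm, by omega⟩]
    · rw [if_neg hnm, if_neg (fun hx => hnm hx.1.symm)]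

theorem pvRowB_len (d : Int) (L : List Int) (row : List Int) :
    (L.foldl (fun r j => r.modify j.toNat (fun v => v + d)) row).length = row.length := by
  induction L generalizing row with
  | nil => rfl
  | cons x xs ih => simp only [List.foldl_cons]; rw [ih, List.length_modify]

theorem pvRowB (d : Int) : ∀ (k : Nat) (t : Int) (row : List Int) (l : Nat), (C : Int) → (C - t).toNat = k → 0 ≤ t →
    C ≤ (row.length : Int) →
    ((PySem.List.pyRange t C).foldl (fun r j => r.modify j.toNat (fun v => v + d)) row).getD l 0
      = row.getD l 0 + (if t ≤ (l:Int) ∧ (l:Int) < C then d else 0) := by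
  intro k
  induction k with
  | zero =>
    intro t row l C h ht hC
    rw [PySem.List.pyRange_one_eq_nil (by omega)]
    simp only [List.foldl_nil]
    rw [if_neg (by omega)]
    ring
  | succ k ih =>
    intro t row l C h ht hC
    rw [PySem.List.pyRange_one_cons (by omega), List.foldl_cons,
      ih (t+1) (row.modify t.toNat (fun v => v + d)) l C (by omega) (by omega)
        (by rw [List.length_modify]; exact hC)]
    simp only [getD_modify_if]
    split_ifs <;> omega

theorem pvRowsB_len {α : Type} (rowOp : α → α) (L : List Int) (bd : List α) :
    (L.foldl (fun b2 i => b2.modify i.toNat rowOp) bd).length = bd.length := by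
  induction L generalizing bd with
  | nil => rfl
  | cons x xs ih => simp only [List.foldl_cons]; rw [ih, List.length_modify]

theorem pvRowsB (rowOp : List Int → List Int) : ∀ (k : Nat) (t : Int) (bd : List (List Int)) (a : Nat) (C : Int),
    (C - t).toNat = k → 0 ≤ t → C ≤ (bd.length : Int) →
    ((PySem.List.pyRange t C).foldl (fun b2 i => b2.modify i.toNat rowOp) bd).getD a []
      = if t ≤ (a:Int) ∧ (a:Int) < C then rowOp (bd.getD a []) else bd.getD a [] := by
  intro k
  induction k with
  | zero =>
    intro t bd a C h ht hC
    rw [PySem.List.pyRange_one_eq_nil (by omega)]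
    simp only [List.foldl_nil]
    rw [if_neg (by omega)]
  | succ k ih =>
    intro t bd a C h ht hC
    rw [PySem.List.pyRange_one_cons (by omega), List.foldl_cons,
      ih (t+1) (bd.modify t.toNat rowOp) a C (by omega) (by omega)
        (by rw [List.length_modify]; exact hC)]
    simp only [getD_modify_if]
    split_ifs <;> first | rfl | omega

theorem pvApplySkill_len (bd : List (List Int)) (s : List Int) :
    (pvApplySkill bd s).length = bd.length := by
  rcases s with _ | ⟨tp, _ | ⟨r1, _ | ⟨c1, _ | ⟨r2, _ | ⟨c2, _ | ⟨degree, _ | ⟨x, rest⟩⟩⟩⟩⟩⟩⟩ <;>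
    first
    | rfl
    | exact pvRowsB_len _ _ _

theorem pvRowsB_getD_len (rowOp : List Int → List Int)
    (hOp : ∀ r, (rowOp r).length = r.length) (L : List Int) :
    ∀ (bd : List (List Int)) (a : Nat),
      ((L.foldl (fun b2 i => b2.modify i.toNat rowOp) bd).getD a []).length = (bd.getD a []).length := by
  induction L with
  | nil => intro bd a; rfl
  | cons x xs ih =>
    intro bd a
    simp only [List.foldl_cons]
    rw [ih]
    simp only [getD_modify_if]
    split_ifs <;> simp [hOp]

theorem pvApplySkill_row_len (bd : List (List Int)) (s : List Int) (a : Nat) :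
    ((pvApplySkill bd s).getD a []).length = (bd.getD a []).length := by
  rcases s with _ | ⟨tp, _ | ⟨r1, _ | ⟨c1, _ | ⟨r2, _ | ⟨c2, _ | ⟨degree, _ | ⟨x, rest⟩⟩⟩⟩⟩⟩⟩ <;>
    first
    | rfl
    | exact pvRowsB_getD_len _ (fun r => pvRowB_len _ _ r) _ bd a

theorem pvApplySkill_get (bd : List (List Int)) (tp r1 c1 r2 c2 degree : Int)
    (h1 : 0 ≤ r1) (_h2 : r1 ≤ r2) (h2' : r2 < (bd.length : Int)) (h3 : 0 ≤ c1) (_h4 : c1 ≤ c2)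
    (hrow : ∀ a : Nat, (a:Int) ≤ r2 → c2 < ((bd.getD a []).length : Int))
    (a l : Nat) :
    ((pvApplySkill bd [tp, r1, c1, r2, c2, degree]).getD a []).getD l 0
      = (bd.getD a []).getD l 0 + pvContrib [tp, r1, c1, r2, c2, degree] (a:Int) (l:Int) := by
  have hc : pvContrib [tp, r1, c1, r2, c2, degree] (a:Int) (l:Int)
      = (if r1 ≤ (a:Int) ∧ (a:Int) ≤ r2 ∧ c1 ≤ (l:Int) ∧ (l:Int) ≤ c2 then
          (if tp = 1 then -degree else degree) else 0) := rfl
  have happ : pvApplySkill bd [tp, r1, c1, r2, c2, degree]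
      = (PySem.List.pyRange r1 (r2+1)).foldl (fun bd2 i =>
          bd2.modify i.toNat (fun row =>
            (PySem.List.pyRange c1 (c2+1)).foldl
              (fun r j => r.modify j.toNat (fun v => v + (if tp = 1 then -degree else degree))) row)) bd := rfl
  rw [hc, happ,
    pvRowsB _ ((r2+1-r1).toNat) r1 bd a (r2+1) rfl h1 (by omega)]
  by_cases hin : r1 ≤ (a:Int) ∧ (a:Int) < r2+1
  · rw [if_pos hin,
      pvRowB _ ((c2+1-c1).toNat) c1 (bd.getD a []) l (c2+1) rfl h3
        (by have := hrow a (by omega); omega)]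
    split_ifs <;> omega
  · rw [if_neg hin, if_neg (by omega)]
    ring

theorem pvApplyFold (board : List (List Int)) (skill : List (List Int))
    (hpre : ∀ s ∈ skill, s.length = 6 ∧
      0 ≤ s.getD 1 0 ∧ s.getD 1 0 ≤ s.getD 3 0 ∧ s.getD 3 0 < (board.length : Int) ∧
      0 ≤ s.getD 2 0 ∧ s.getD 2 0 ≤ s.getD 4 0 ∧ s.getD 4 0 < ((board.getD 0 []).length : Int))
    (hrows : ∀ a : Nat, a < board.length → (board.getD 0 []).length ≤ (board.getD a []).length) :
    (skill.foldl pvApplySkill board).length = board.length ∧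
    (∀ a : Nat, ((skill.foldl pvApplySkill board).getD a []).length = (board.getD a []).length) ∧
    (∀ a l : Nat, a < board.length → l < (board.getD 0 []).length →
      ((skill.foldl pvApplySkill board).getD a []).getD l 0
        = (board.getD a []).getD l 0 + (skill.map (fun s => pvContrib s (a:Int) (l:Int))).sum) := by
  induction skill generalizing board with
  | nil => exact ⟨rfl, fun a => rfl, by intro a l _ _; simp⟩
  | cons s rest ih =>
    obtain ⟨hlen6, hb1, hb2, hb3, hb4, hb5, hb6⟩ := hpre s (List.mem_cons_self)
    rcases s with _ | ⟨tp, _ | ⟨r1, _ | ⟨c1, _ | ⟨r2, _ | ⟨c2, _ | ⟨degree, _ | ⟨x, rest2⟩⟩⟩⟩⟩⟩⟩ <;>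
      simp only [List.length_cons, List.length_nil] at hlen6 <;> try omega
    simp only [List.getD_cons_succ, List.getD_cons_zero] at hb1 hb2 hb3 hb4 hb5 hb6
    have hlen' : (pvApplySkill board [tp, r1, c1, r2, c2, degree]).length = board.length :=
      pvApplySkill_len board _
    have hrlen' : ∀ a : Nat,
        ((pvApplySkill board [tp, r1, c1, r2, c2, degree]).getD a []).length
          = (board.getD a []).length := fun a => pvApplySkill_row_len board _ a
    obtain ⟨ih1, ih2, ih3⟩ := ih (pvApplySkill board [tp, r1, c1, r2, c2, degree])
      (by
        intro s2 hs2
        have h := hpre s2 (List.mem_cons_of_mem _ hs2)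
        rw [hlen', hrlen' 0]
        exact h)
      (by
        intro a ha
        rw [hrlen' 0, hrlen' a]
        exact hrows a (by omega))
    refine ⟨by simp only [List.foldl_cons]; rw [ih1, hlen'], ?_, ?_⟩
    · intro a
      simp only [List.foldl_cons]
      rw [ih2 a, hrlen' a]
    · intro a l ha hl
      simp only [List.foldl_cons, List.map_cons, List.sum_cons]
      rw [ih3 a l (by omega) (by rw [hrlen' 0]; exact hl),
        pvApplySkill_get board tp r1 c1 r2 c2 degree hb1 hb2 hb3 hb4 hb5
          (by
            intro a2 ha2
            have h0 := hrows a2 (by omega)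
            omega)
          a l]
      ring

-- ===== VERDICT (by name: the statement is the Claim_ definition above) =====
theorem solution_spec : Claim_equal_solution := by
  intro board skill _hdom hpre
  obtain ⟨hne, hrows, hsk⟩ := hpre
  unfold Spec_solution
  have hrowsD : ∀ a : Nat, a < board.length →
      (board.getD 0 []).length ≤ (board.getD a []).length := by
    intro a ha
    refine hrows _ ?_
    rw [List.getD_eq_getElem?_getD, List.getElem?_eq_getElem ha]
    exact List.getElem_mem ha
  obtain ⟨hL, hRL, hV⟩ := pvApplyFold board skill hsk hrowsD
  have hcell : ∀ i j : Int, 0 ≤ i → i < (board.length : Int) → 0 ≤ j →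
      j < ((board.getD 0 []).length : Int) →
      pvGet2 board i j + pvCum3 skill (board.length : Int) ((board.getD 0 []).length : Int) i j
        = pvGet2 (skill.foldl pvApplySkill board) i j := by
    intro i j hi0 hi1 hj0 hj1
    have hv := hV i.toNat j.toNat (by omega) (by omega)
    unfold pvGet2
    rw [PySem.List.pyGetD_of_nonneg board [] hi0,
      PySem.List.pyGetD_of_nonneg (board.getD i.toNat []) 0 hj0,
      PySem.List.pyGetD_of_nonneg (skill.foldl pvApplySkill board) [] hi0,
      PySem.List.pyGetD_of_nonneg ((skill.foldl pvApplySkill board).getD i.toNat []) 0 hj0,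
      hv, Int.toNat_of_nonneg hi0, Int.toNat_of_nonneg hj0,
      pvCum3_eval skill _ _ (by omega) (by omega) i j ⟨hi0, by omega⟩ ⟨hj0, by omega⟩,
      show pvCum1 skill = (fun x y => (skill.map (fun s => pvFour s x y)).sum) from
        funext fun x => funext fun y => pvCum1_apply skill x y,
      pvS2_linear,
      show skill.map (fun s => pvS2 (pvFour s) i j) = skill.map (fun s => pvContrib s i j) from
        List.map_congr_left (by
          intro s hs
          obtain ⟨h6, k1, k2, k3, k4, k5, k6⟩ := hsk s hs
          rcases s with _ | ⟨tp, _ | ⟨r1, _ | ⟨c1, _ | ⟨r2, _ | ⟨c2, _ | ⟨degree, _ | ⟨x, rest2⟩⟩⟩⟩⟩⟩⟩ <;>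
            simp only [List.length_cons, List.length_nil] at h6 <;> try omega
          simp only [List.getD_cons_succ, List.getD_cons_zero] at k1 k2 k4 k5
          exact pvS2_four tp r1 c1 r2 c2 degree k1 k2 k4 k5 i j)]
  simp only [solution, solution_alt]
  rw [hL, hRL 0]
  refine PySem.List.foldl_congr_mem _ _ _ _ ?_
  intro acc i hi
  refine PySem.List.foldl_congr_mem _ _ _ _ ?_
  intro acc' j hj
  rw [PySem.List.mem_pyRange_one] at hi hj
  rw [hcell i j hi.1 hi.2 hj.1 hj.2]
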